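-- pv_equiv track=rewrite | github.com/JamesMClarke/AXECC | graph_trackers.py | count_counts
-- ===== SOURCE A (Python) =====
-- def count_counts(counts):
--     counts_of_counts = {}
--     for count in counts.values():
--         if count in counts_of_counts:
--             counts_of_counts[count] += 1
--         else:
--             counts_of_counts[count] = 1
--     return(dict(sorted(counts_of_counts.items(), reverse=False)))
-- ===== SOURCE B (Python) =====
-- def count_counts(counts):
--     # Simpler/alternative: sort the values once, then one run-length pass over the
--     # sorted list; the dict is emitted already in ascending key order.
--     vals = sorted(counts.values())
--     result = {}
--     i, n = 0, len(vals)
--     while i < n: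
--         j = i + 1
--         while j < n and vals[j] == vals[i]:
--             j += 1
--         result[vals[i]] = j - i
--         i = j
--     return result
-- ===== Notes on version B (the rewrite author's own statement) =====
-- stated objective: alternative
-- what changed: A builds a histogram dict over the values and then sorts its items; B sorts the values once and emits run lengths of equal values in a single pass over the sorted list, so no histogram dict and no final sort of items is needed.
import Mathlib
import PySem

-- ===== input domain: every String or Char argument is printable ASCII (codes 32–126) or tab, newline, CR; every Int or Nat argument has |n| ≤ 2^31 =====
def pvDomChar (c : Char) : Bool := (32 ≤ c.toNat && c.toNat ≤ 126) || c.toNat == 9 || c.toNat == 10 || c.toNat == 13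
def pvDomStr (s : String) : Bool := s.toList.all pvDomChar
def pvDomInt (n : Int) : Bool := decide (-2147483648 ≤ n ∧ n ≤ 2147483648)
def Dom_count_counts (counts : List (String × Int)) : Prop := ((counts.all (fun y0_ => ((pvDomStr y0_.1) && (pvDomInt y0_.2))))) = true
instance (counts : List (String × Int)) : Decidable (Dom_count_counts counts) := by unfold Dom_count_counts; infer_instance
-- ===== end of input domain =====

-- B replaces A's histogram-dict-then-sort with one run-length pass over the sorted
-- value list (objective: alternative decomposition, same asymptotic cost).

-- ===== PORT A =====
-- A's parameter is a Python dict; the association list is materialised as a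
-- PySem.Dict exactly as dict(pairs) would (later duplicate keys overwrite in place).
def count_counts (counts : List (String × Int)) : List (Int × Int) :=
  let d : PySem.Dict String Int :=
    counts.foldl (fun d p => d.insert p.1 p.2) PySem.Dict.empty
  -- counts_of_counts = {}; for count in counts.values(): ...
  let coc : PySem.Dict Int Int :=
    d.values.foldl
      (fun m c => if m.contains c then m.modify c 0 (· + 1) else m.insert c 1)
      PySem.Dict.empty
  -- dict(sorted(counts_of_counts.items())): dict items have distinct keys, so
  -- Python's tuple comparison on the pairs is comparison of the first components.
  ((PySem.List.sorted coc.items (fun p => p.1)).foldl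
      (fun r p => r.insert p.1 p.2) PySem.Dict.empty).items

-- ===== PORT B =====
-- the outer while loop of Source B, as structural recursion on the remaining suffix:
-- the inner while counts the leading run of the head value, the outer step drops it.
def pvRle : List Int → List (Int × Int)
  | [] => []
  | v :: rest =>
    (v, ((rest.takeWhile (fun x => x == v)).length + 1 : Int))
      :: pvRle (rest.dropWhile (fun x => x == v))
termination_by l => l.length
decreasing_by
  simpa using Nat.lt_succ_of_le (List.Sublist.length_le (List.dropWhile_sublist _))

def count_counts_alt (counts : List (String × Int)) : List (Int × Int) :=
  let d : PySem.Dict String Int :=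
    counts.foldl (fun d p => d.insert p.1 p.2) PySem.Dict.empty
  -- vals = sorted(counts.values())
  let vals := PySem.List.sorted d.values (fun x => x)
  -- result = {}; run-length loop; keys are emitted once each (fresh inserts)
  ((pvRle vals).foldl (fun r p => r.insert p.1 p.2) PySem.Dict.empty).items

-- ===== PRECONDITION & SPEC =====
def Spec_count_counts (counts : List (String × Int)) (out : List (Int × Int)) : Prop := out = count_counts_alt counts
instance (counts : List (String × Int)) (out : List (Int × Int)) : Decidable (Spec_count_counts counts out) := by unfold Spec_count_counts; infer_instance

-- ===== CLAIM (what is proved, stated in full; the proofs are below) =====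
def Claim_equal_count_counts : Prop := ∀ (counts : List (String × Int)), Dom_count_counts counts → Spec_count_counts counts (count_counts counts)

-- ===== LEMMAS AND PROOFS =====

-- the canonical value both programs compute from the value list l:
-- ascending distinct values, each paired with its multiplicity in l
def pvCanon (l : List Int) : List (Int × Int) :=
  (PySem.List.sorted (PySem.Set.ofList l) (fun x => x)).map
    (fun v => (v, (l.count v : Int)))

lemma pvSltMem (l : List Int) (x : Int) :
    x ∈ PySem.List.sorted (PySem.Set.ofList l) (fun x => x) ↔ x ∈ l := by
  rw [(PySem.List.sorted_perm (PySem.Set.ofList l) (fun x => x) false).mem_iff]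
  exact PySem.Set.mem_ofList l x

lemma pvSltNodup (l : List Int) :
    (PySem.List.sorted (PySem.Set.ofList l) (fun x => x)).Nodup :=
  ((PySem.List.sorted_perm (PySem.Set.ofList l) (fun x => x) false).nodup_iff).mpr
    (PySem.Set.nodup_ofList l)

lemma pvSltLt (l : List Int) :
    List.Pairwise (· < ·) (PySem.List.sorted (PySem.Set.ofList l) (fun x => x)) := by
  have h1 := PySem.List.sorted_pairwise (PySem.Set.ofList l) (fun x => x)
  have h2 := pvSltNodup l
  exact (h1.and h2).imp (fun ⟨hle, hne⟩ => lt_of_le_of_ne hle hne)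

-- a fold of fresh-key inserts into an empty dict just lists the pairs
lemma pvDictOfFresh (xs : List (Int × Int)) (h : (xs.map (·.1)).Nodup) :
    ((xs.foldl (fun r p => r.insert p.1 p.2) PySem.Dict.empty).items) = xs := by
  have := PySem.Dict.items_foldl_insert_fresh xs (·.1) (·.2)
      (PySem.Dict.empty) (by intro a _; rfl) h
  simpa using this

-- A's histogram loop is PySem's counter
lemma pvCocEqCounter (vals : List Int) :
    vals.foldl
      (fun m c => if m.contains c then m.modify c 0 (· + 1) else m.insert c 1)
      PySem.Dict.empty = PySem.Dict.counter vals := by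
  rw [← PySem.Dict.foldl_insert_getD_add_one_eq_counter]
  apply List.foldl_ext
  intro m c _
  by_cases h : m.contains c = true
  · simp [h, PySem.Dict.modify]
  · simp only [Bool.not_eq_true] at h
    simp [h, PySem.Dict.getD_of_not_contains m 0 h]

-- sorting the counter's items by key gives the canonical list
lemma pvSortedCounter (vals : List Int) :
    PySem.List.sorted (PySem.Dict.counter vals).items (fun p => p.1) = pvCanon vals := by
  apply PySem.List.sorted_eq_of_perm_of_pairwise_lt
  · rw [PySem.Dict.items_counter]
    exact (PySem.List.sorted_perm (PySem.Set.ofList vals) (fun x => x) false).map _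
  · unfold pvCanon
    rw [List.pairwise_map]
    exact pvSltLt vals

-- all elements after dropping the leading run are strictly greater than the head
lemma pvDropGt (v : Int) (rest : List Int) (h : List.Pairwise (· ≤ ·) (v :: rest)) :
    ∀ x ∈ rest.dropWhile (fun x => x == v), v < x := by
  rcases hd : rest.dropWhile (fun x => x == v) with _ | ⟨a, tl⟩
  · simp
  · have hmemrest : ∀ x ∈ a :: tl, x ∈ rest := by
      intro x hx; rw [← hd] at hx; exact (List.dropWhile_sublist _).mem hx
    have hva : v < a := by
      have h1 : v ≤ a := (List.pairwise_cons.mp h).1 a (hmemrest a (by simp))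
      have h2 : (a == v) = false := by
        have := List.head_dropWhile_not (l := rest) (fun x => x == v) (by simp [hd])
        simpa [hd] using this
      exact lt_of_le_of_ne h1 (Ne.symm (beq_eq_false_iff_ne.mp h2))
    intro x hx
    rcases (List.mem_cons.mp hx) with rfl | hx
    · exact hva
    · have hpw : List.Pairwise (· ≤ ·) (a :: tl) := by
        rw [← hd]
        exact ((List.pairwise_cons.mp h).2).sublist (List.dropWhile_sublist _)
      exact lt_of_lt_of_le hva ((List.pairwise_cons.mp hpw).1 x hx)

-- B's run-length pass over a sorted list is the canonical list
lemma pvRleCanon (l : List Int) (h : List.Pairwise (· ≤ ·) l) : pvRle l = pvCanon l := by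
  induction l using pvRle.induct with
  | case1 => simp [pvRle, pvCanon]; rfl
  | case2 v rest ih =>
    have hgt := pvDropGt v rest h
    set t := rest.takeWhile (fun x => x == v) with ht
    set r' := rest.dropWhile (fun x => x == v) with hr'
    have htv : ∀ x ∈ t, x = v := by
      intro x hx; simpa using List.mem_takeWhile_imp hx
    have hsplit : t ++ r' = rest := List.takeWhile_append_dropWhile
    have hvr' : v ∉ r' := fun hx => lt_irrefl v (hgt v hx)
    have hpw' : List.Pairwise (· ≤ ·) r' :=
      ((List.pairwise_cons.mp h).2).sublist (List.dropWhile_sublist _)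
    -- membership of v :: rest is {v} ∪ r'
    have hmem : ∀ x, x ∈ (v :: rest) ↔ x = v ∨ x ∈ r' := by
      intro x
      constructor
      · intro hx
        rcases List.mem_cons.mp hx with rfl | hx
        · exact Or.inl rfl
        · rw [← hsplit] at hx
          rcases List.mem_append.mp hx with hx | hx
          · exact Or.inl (htv x hx)
          · exact Or.inr hx
      · rintro (rfl | hx)
        · exact List.mem_cons_self
        · exact List.mem_cons_of_mem _ (by rw [← hsplit]; exact List.mem_append_right _ hx)
    -- sorted distinct values of v :: rest = v :: sorted distinct values of r'
    have hslt : PySem.List.sorted (PySem.Set.ofList (v :: rest)) (fun x => x)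
        = v :: PySem.List.sorted (PySem.Set.ofList r') (fun x => x) := by
      apply PySem.List.sorted_eq_of_perm_of_pairwise_lt
      · apply (List.perm_ext_iff_of_nodup _ (PySem.Set.nodup_ofList _)).mpr
        · intro x
          simp only [List.mem_cons, pvSltMem, PySem.Set.mem_ofList]
          simpa using (hmem x).symm
        · exact List.nodup_cons.mpr ⟨fun hx => hvr' ((pvSltMem r' v).mp hx), pvSltNodup r'⟩
      · exact List.pairwise_cons.mpr ⟨fun x hx => hgt x ((pvSltMem r' x).mp hx), pvSltLt r'⟩
    -- counts
    have hcv : (v :: rest).count v = t.length + 1 := by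
      have h0 : r'.count v = 0 := List.count_eq_zero.mpr hvr'
      have h1 : t.count v = t.length := by
        rw [List.count_eq_length]
        intro a ha; exact (htv a ha).symm
      rw [List.count_cons_self, ← hsplit, List.count_append, h0, h1]
    have hcw : ∀ w ∈ r', (v :: rest).count w = r'.count w := by
      intro w hw
      have hwv : w ≠ v := fun e => hvr' (e ▸ hw)
      have h1 : t.count w = 0 := List.count_eq_zero.mpr (fun hx => hwv (htv w hx ▸ htv w hx))
      rw [← hsplit]
      simp [List.count_append, h1, Ne.symm hwv]
    -- assemble
    rw [pvRle]
    rw [← ht, ← hr']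
    unfold pvCanon
    rw [hslt, List.map_cons, hcv, ih hpw']
    unfold pvCanon
    have htl : List.map (fun w => (w, (r'.count w : Int)))
          (PySem.List.sorted (PySem.Set.ofList r') (fun x => x))
        = List.map (fun w => (w, ((v :: rest).count w : Int)))
          (PySem.List.sorted (PySem.Set.ofList r') (fun x => x)) := by
      apply List.map_congr_left
      intro w hw
      rw [hcw w ((pvSltMem r' w).mp hw)]
    rw [htl]
    norm_cast

-- keys of the canonical list are distinct
lemma pvCanonKeysNodup (l : List Int) : ((pvCanon l).map (·.1)).Nodup := by
  unfold pvCanon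
  rw [List.map_map]
  simpa [Function.comp_def] using pvSltNodup l

lemma pvACanon (vals : List Int) :
    ((PySem.List.sorted
        (vals.foldl
          (fun m c => if m.contains c then m.modify c 0 (· + 1) else m.insert c 1)
          PySem.Dict.empty).items (fun p => p.1)).foldl
      (fun r p => r.insert p.1 p.2) PySem.Dict.empty).items = pvCanon vals := by
  rw [pvCocEqCounter, pvSortedCounter]
  exact pvDictOfFresh _ (pvCanonKeysNodup vals)

lemma pvBCanon (vals : List Int) :
    ((pvRle (PySem.List.sorted vals (fun x => x))).foldl
      (fun r p => r.insert p.1 p.2) PySem.Dict.empty).items = pvCanon vals := by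
  set s := PySem.List.sorted vals (fun x => x) with hs
  have hperm : s.Perm vals := PySem.List.sorted_perm vals (fun x => x) false
  have h1 : pvRle s = pvCanon s := pvRleCanon s (PySem.List.sorted_pairwise vals (fun x => x))
  have h2 : pvCanon s = pvCanon vals := by
    unfold pvCanon
    have hslt : PySem.List.sorted (PySem.Set.ofList s) (fun x => x)
        = PySem.List.sorted (PySem.Set.ofList vals) (fun x => x) := by
      apply PySem.List.sorted_eq_of_perm_of_pairwise_lt
      · apply (List.perm_ext_iff_of_nodup (pvSltNodup vals) (PySem.Set.nodup_ofList _)).mpr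
        intro x
        rw [pvSltMem, PySem.Set.mem_ofList, hperm.mem_iff]
      · exact pvSltLt vals
    rw [hslt]
    apply List.map_congr_left
    intro w _
    rw [hperm.count_eq]
  rw [h1, h2]
  exact pvDictOfFresh _ (pvCanonKeysNodup vals)

-- ===== VERDICT (by name: the statement is the Claim_ definition above) =====
theorem count_counts_spec : Claim_equal_count_counts := by
  intro counts _
  unfold Spec_count_counts count_counts count_counts_alt
  rw [pvACanon, pvBCanon]
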